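-- pv_equiv track=rewrite | github.com/sachinvmurthy/revision-qna-app | qna-app/services/convert_pdf2text.py | remove_last_line
-- ===== SOURCE A (Python) =====
-- def remove_last_line(paragraph):
--     lines = paragraph.split('.')
--     lines = lines[:-1]
--     formatted_paragraph = ''
--     for line in lines:
--         line = line + '.'
--         formatted_paragraph = formatted_paragraph + line
--     return formatted_paragraph
-- ===== SOURCE B (Python) =====
-- def remove_last_line(paragraph):
--     idx = paragraph.rfind('.')
--     if idx == -1:
--         return ''
--     return paragraph[:idx + 1]
-- ===== Notes on version B (the rewrite author's own statement) =====
-- stated objective: simpler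
-- what changed: Replaces the split/drop-last/concatenation loop by a single search for the last period and one slice up to and including it.
import Mathlib
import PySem

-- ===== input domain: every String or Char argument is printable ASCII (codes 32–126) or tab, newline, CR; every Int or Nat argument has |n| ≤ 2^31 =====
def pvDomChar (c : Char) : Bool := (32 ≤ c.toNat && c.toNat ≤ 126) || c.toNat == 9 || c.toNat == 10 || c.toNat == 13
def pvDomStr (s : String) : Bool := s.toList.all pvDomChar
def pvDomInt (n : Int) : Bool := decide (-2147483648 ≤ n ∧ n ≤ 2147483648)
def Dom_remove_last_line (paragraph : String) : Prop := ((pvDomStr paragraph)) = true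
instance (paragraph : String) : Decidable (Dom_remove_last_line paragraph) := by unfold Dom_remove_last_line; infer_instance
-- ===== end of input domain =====

-- B replaces A's split/drop-last/concatenation loop by one rfind of the last period plus one slice; return values proved equal on all inputs.

-- ===== PORT A =====
def remove_last_line (paragraph : String) : String :=
  let lines : List String := (PySem.Str.split? paragraph ".").getD []  -- sep "." is nonempty, so split? is always `some`
  let lines := PySem.List.slice lines none (some (-1))
  lines.foldl (fun formatted_paragraph line => formatted_paragraph ++ (line ++ ".")) ""

-- ===== PORT B =====
def remove_last_line_alt (paragraph : String) : String :=
  let idx := PySem.Str.rfind paragraph "."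
  if idx == -1 then "" else PySem.Str.slice paragraph none (some (idx + 1))

-- ===== PRECONDITION & SPEC =====
def Spec_remove_last_line (paragraph : String) (out : String) : Prop := out = remove_last_line_alt paragraph
instance (paragraph : String) (out : String) : Decidable (Spec_remove_last_line paragraph out) := by unfold Spec_remove_last_line; infer_instance

-- ===== CLAIM (what is proved, stated in full; the proofs are below) =====
def Claim_equal_remove_last_line : Prop := ∀ (paragraph : String), Dom_remove_last_line paragraph → Spec_remove_last_line paragraph (remove_last_line paragraph)

-- ===== LEMMAS AND PROOFS =====

/-- Common characterisation: the string up to and including its last '.', else empty. -/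
def pvSpec : List Char → List Char
  | [] => []
  | c :: r => if c = '.' then '.' :: pvSpec r else if '.' ∈ r then c :: pvSpec r else []

/-- Fuel-free model of `PySem.Chars.splitOn.go ['.']`. -/
def pvSp : List Char → List Char → List (List Char)
  | cur, [] => [cur.reverse]
  | cur, x :: r => if x = '.' then cur.reverse :: pvSp [] r else pvSp (x :: cur) r

/-- Model of `PySem.Chars.rfind.go` for sub = ['.']. -/
def pvRgo (s : List Char) : Nat → Int
  | 0 => if ['.'].isPrefixOf s then 0 else -1
  | j + 1 => if ['.'].isPrefixOf (s.drop (j + 1)) then ((j : Int) + 1) else pvRgo s j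

lemma pvSp_ne_nil (cur l : List Char) : pvSp cur l ≠ [] := by
  induction l generalizing cur with
  | nil => simp [pvSp]
  | cons x r ih => simp only [pvSp]; split_ifs <;> simp [ih]

lemma pvSpec_of_not_mem {r : List Char} (h : '.' ∉ r) : pvSpec r = [] := by
  induction r with
  | nil => rfl
  | cons c t ih =>
    simp only [List.mem_cons, not_or] at h
    simp [pvSpec, Ne.symm h.1, h.2]

lemma go_eq_pvSp : ∀ (fuel : Nat) (l cur : List Char) (acc : List (List Char)),
    l.length ≤ fuel →
    PySem.Chars.splitOn.go ['.'] fuel l cur acc = acc.reverse ++ pvSp cur l := by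
  intro fuel
  induction fuel with
  | zero =>
    intro l cur acc h
    have hl : l = [] := List.length_eq_zero_iff.mp (Nat.le_zero.mp h)
    subst hl
    simp [PySem.Chars.splitOn.go, pvSp]
  | succ n ih =>
    intro l cur acc h
    cases l with
    | nil => simp [PySem.Chars.splitOn.go, pvSp]
    | cons c rest =>
      simp only [List.length_cons, Nat.succ_le_succ_iff] at h
      by_cases hc : c = '.'
      · subst hc
        have hpre : List.isPrefixOf ['.'] ('.' :: rest) = true := by
          simp [List.isPrefixOf]
        rw [PySem.Chars.splitOn.go, if_pos hpre]
        simp only [List.length_singleton, List.drop_one, List.tail_cons]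
        rw [ih rest [] (cur.reverse :: acc) h]
        simp [pvSp]
      · have hpre : List.isPrefixOf ['.'] (c :: rest) = false := by
          simp only [List.isPrefixOf, Bool.and_eq_false_iff, beq_eq_false_iff_ne]
          exact Or.inl fun hx => hc hx.symm
        rw [PySem.Chars.splitOn.go, if_neg (by simp [hpre])]
        rw [ih rest (c :: cur) acc h]
        rw [show pvSp cur (c :: rest) = pvSp (c :: cur) rest from by
          simp only [pvSp, if_neg hc]]

lemma pvSp_dropLast_join (l : List Char) : ∀ cur,
    ((pvSp cur l).dropLast.map (· ++ ['.'])).flatten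
      = if '.' ∈ l then cur.reverse ++ pvSpec l else [] := by
  induction l with
  | nil => intro cur; simp [pvSp]
  | cons c r ih =>
    intro cur
    by_cases hc : c = '.'
    · subst hc
      rw [show pvSp cur ('.' :: r) = cur.reverse :: pvSp [] r from by simp [pvSp]]
      rw [List.dropLast_cons_of_ne_nil (pvSp_ne_nil [] r)]
      simp only [List.map_cons, List.flatten_cons, ih []]
      by_cases hr : '.' ∈ r
      · simp [hr, pvSpec]
      · simp [hr, pvSpec, pvSpec_of_not_mem hr]
    · simp only [pvSp, if_neg hc]
      rw [ih (c :: cur)]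
      by_cases hr : '.' ∈ r
      · simp [hr, hc, pvSpec]
      · have : '.' ∉ c :: r := by simp [Ne.symm hc, hr]
        simp [hr, this]

/-- A's concatenation loop, at the character level. -/
lemma foldl_append_toList (pieces : List (List Char)) : ∀ (init : String),
    (((pieces.map String.ofList).foldl
        (fun formatted_paragraph line => formatted_paragraph ++ (line ++ ".")) init)).toList
      = init.toList ++ (pieces.map (· ++ ['.'])).flatten := by
  induction pieces with
  | nil => intro init; simp
  | cons p t ih =>
    intro init
    simp only [List.map_cons, List.foldl_cons, List.flatten_cons]
    rw [ih]
    simp [String.toList_append, String.toList_ofList]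

lemma rfind_go_eq (s : List Char) : ∀ j : Nat, PySem.Chars.rfind.go s ['.'] j = pvRgo s j := by
  intro j
  induction j with
  | zero => rw [PySem.Chars.rfind.go]; rfl
  | succ n ih => rw [PySem.Chars.rfind.go, pvRgo, ih]; push_cast; rfl

lemma pvRgo_nonneg_or (s : List Char) (j : Nat) : pvRgo s j = -1 ∨ 0 ≤ pvRgo s j := by
  induction j with
  | zero => by_cases h : List.isPrefixOf ['.'] s <;> simp [pvRgo, h]
  | succ n ih =>
    by_cases h : List.isPrefixOf ['.'] (s.drop (n + 1)) <;> simp [pvRgo, h]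
    · right; omega
    · exact ih

lemma isPrefixOf_dot (xs : List Char) :
    List.isPrefixOf ['.'] xs = true ↔ ∃ t, xs = '.' :: t := by
  cases xs with
  | nil => simp [List.isPrefixOf]
  | cons a t =>
    simp only [List.isPrefixOf, Bool.and_true]
    constructor
    · intro h; exact ⟨t, by simpa using (beq_iff_eq.mp h) ▸ rfl⟩
    · rintro ⟨t', ht⟩; cases ht; simp

lemma pvRgo_cons (c : Char) (r : List Char) : ∀ j : Nat,
    pvRgo (c :: r) (j + 1)
      = if pvRgo r j = -1 then (if c = '.' then 0 else -1) else pvRgo r j + 1 := by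
  intro j
  induction j with
  | zero =>
    simp only [pvRgo, List.drop_succ_cons, List.drop_zero]
    by_cases h : List.isPrefixOf ['.'] r
    · simp [h]
    · have hc : List.isPrefixOf ['.'] (c :: r) = true ↔ c = '.' := by
        rw [isPrefixOf_dot]
        constructor
        · rintro ⟨t, ht⟩; cases ht; rfl
        · intro hc; exact ⟨r, by rw [hc]⟩
      by_cases hcd : c = '.'
      · simp [h, hcd]
      · simp [h, hcd, (by simpa [hcd] using hc : _)]
  | succ n ih =>
    have hdrop : (c :: r).drop (n + 1 + 1) = r.drop (n + 1) := rfl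
    rw [pvRgo, hdrop]
    by_cases h : List.isPrefixOf ['.'] (r.drop (n + 1)) = true
    · rw [if_pos h]
      have hr : pvRgo r (n + 1) = (n : Int) + 1 := by rw [pvRgo, if_pos h]
      rw [hr, if_neg (by omega)]
      push_cast; ring
    · rw [if_neg h]
      have hr : pvRgo r (n + 1) = pvRgo r n := by rw [pvRgo, if_neg h]
      rw [hr, ih]

lemma pvRgo_neg_one_iff (r : List Char) : pvRgo r r.length = -1 ↔ '.' ∉ r := by
  induction r with
  | nil => simp [pvRgo, List.isPrefixOf]
  | cons c t ih =>
    rw [List.length_cons, pvRgo_cons]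
    by_cases h : pvRgo t t.length = -1
    · by_cases hc : c = '.'
      · simp [h, hc, ih.mp h]
      · simp [h, hc, Ne.symm hc, ih.mp h]
    · rcases pvRgo_nonneg_or t t.length with h' | h'
      · exact absurd h' h
      · constructor
        · intro hcontra; simp [h] at hcontra; omega
        · intro hmem
          exact absurd (ih.mpr (by simp [List.mem_cons, not_or] at hmem; exact hmem.2)) h

lemma pvRgo_take_eq_pvSpec : ∀ l : List Char,
    (if pvRgo l l.length = -1 then [] else l.take (pvRgo l l.length + 1).toNat) = pvSpec l := by
  intro l
  induction l with
  | nil => simp [pvRgo, List.isPrefixOf, pvSpec]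
  | cons c r ih =>
    rw [List.length_cons, pvRgo_cons]
    by_cases h : pvRgo r r.length = -1
    · have hmem : '.' ∉ r := (pvRgo_neg_one_iff r).mp h
      by_cases hc : c = '.'
      · subst hc
        simp only [if_pos h]
        have : pvSpec ('.' :: r) = '.' :: pvSpec r := by simp [pvSpec]
        rw [this, pvSpec_of_not_mem hmem]
        norm_num
      · simp [h, hc, pvSpec, hmem]
    · rcases pvRgo_nonneg_or r r.length with h' | h'
      · exact absurd h' h
      · have hmem : '.' ∈ r := by
          by_contra hm; exact h ((pvRgo_neg_one_iff r).mpr hm)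
        rw [if_neg h, if_neg (by omega)]
        have htn : (pvRgo r r.length + 1 + 1).toNat = (pvRgo r r.length + 1).toNat + 1 := by omega
        rw [htn, List.take_succ_cons]
        rw [if_neg h] at ih
        by_cases hc : c = '.'
        · subst hc; simp [pvSpec, ih]
        · simp [pvSpec, hc, hmem, ih]

lemma toList_A (p : String) :
    (remove_last_line p).toList
      = ((pvSp [] p.toList).dropLast.map (· ++ ['.'])).flatten := by
  have hsplit : PySem.Str.split? p "." = some ((pvSp [] p.toList).map String.ofList) := by
    have htl : (".").toList = ['.'] := rfl
    rw [PySem.Str.split?, htl, PySem.Chars.split?]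
    rw [if_neg (by simp)]
    rw [PySem.Chars.splitOn, go_eq_pvSp _ _ _ _ (by omega)]
    simp
  rw [remove_last_line]
  simp only [hsplit, Option.getD_some, PySem.List.slice_to_neg_one]
  rw [← List.map_dropLast]
  rw [foldl_append_toList]
  rfl

lemma toList_B (p : String) : (remove_last_line_alt p).toList = pvSpec p.toList := by
  have hrf : PySem.Str.rfind p "." = pvRgo p.toList p.toList.length := by
    have htl : (".").toList = ['.'] := rfl
    rw [PySem.Str.rfind, htl, PySem.Chars.rfind, rfind_go_eq]
  rw [← pvRgo_take_eq_pvSpec p.toList]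
  rw [remove_last_line_alt]
  simp only [hrf, String.length_toList]
  by_cases h : pvRgo p.toList p.toList.length = -1
  · rw [String.length_toList] at h
    simp [h]
  · rw [String.length_toList] at h
    rcases pvRgo_nonneg_or p.toList p.length with h' | h'
    · exact absurd h' h
    · rw [if_neg (by simpa using h), if_neg h]
      rw [PySem.Str.slice]
      rw [show PySem.Chars.slice p.toList none (some (pvRgo p.toList p.length + 1))
            = PySem.List.slice p.toList none (some (pvRgo p.toList p.length + 1)) from
          PySem.Chars.slice_eq_listSlice _ _ _]
      rw [PySem.List.slice_to _ (by omega)]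
      simp

-- ===== VERDICT (by name: the statement is the Claim_ definition above) =====
theorem remove_last_line_spec : Claim_equal_remove_last_line := by
  intro p _
  unfold Spec_remove_last_line
  apply String.toList_inj.mp
  rw [toList_A, toList_B, pvSp_dropLast_join]
  by_cases h : '.' ∈ p.toList
  · simp [h]
  · simp [h, pvSpec_of_not_mem h]
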